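-- pv_equiv track=rewrite | github.com/rk02-byte/SHL-riya-recommender | simple_agent.py | _is_off_topic
-- ===== SOURCE A (Python) =====
-- def _is_off_topic(query: str) -> bool:
--     """Check if query is off-topic (not related to SHL assessments)"""
--     off_topic_keywords = [
--         "weather", "sports", "politics", "entertainment", "news",
--         "personal advice", "medical", "legal", "financial advice",
--         "cooking", "travel", "relationships", "general knowledge"
--     ]
--
--     query_lower = query.lower()
--     for keyword in off_topic_keywords:
--         if keyword in query_lower:
--             return True
--     return False
-- ===== SOURCE B (Python) =====
-- def _is_off_topic(query: str) -> bool: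
--     """Check if query is off-topic (not related to SHL assessments)"""
--     ql = query.lower()
--     # position-major scan with a first-character dispatch: walk the query once
--     # and only test the keywords whose first letter matches the current char
--     for i, ch in enumerate(ql):
--         if ch == 'w':
--             if ql.startswith("weather", i): return True
--         elif ch == 's':
--             if ql.startswith("sports", i): return True
--         elif ch == 'p':
--             if ql.startswith("politics", i) or ql.startswith("personal advice", i): return True
--         elif ch == 'e':
--             if ql.startswith("entertainment", i): return True
--         elif ch == 'n':
--             if ql.startswith("news", i): return True
--         elif ch == 'm':
--             if ql.startswith("medical", i): return True
--         elif ch == 'l':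
--             if ql.startswith("legal", i): return True
--         elif ch == 'f':
--             if ql.startswith("financial advice", i): return True
--         elif ch == 'c':
--             if ql.startswith("cooking", i): return True
--         elif ch == 't':
--             if ql.startswith("travel", i): return True
--         elif ch == 'r':
--             if ql.startswith("relationships", i): return True
--         elif ch == 'g':
--             if ql.startswith("general knowledge", i): return True
--     return False
-- ===== Notes on version B (the rewrite author's own statement) =====
-- stated objective: alternative
-- what changed: Replaces A's 13 independent full substring scans (one per keyword) with a single position-major pass over the query that dispatches on the current character's first letter and only tests matching keywords as prefixes there.
import Mathlib
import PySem

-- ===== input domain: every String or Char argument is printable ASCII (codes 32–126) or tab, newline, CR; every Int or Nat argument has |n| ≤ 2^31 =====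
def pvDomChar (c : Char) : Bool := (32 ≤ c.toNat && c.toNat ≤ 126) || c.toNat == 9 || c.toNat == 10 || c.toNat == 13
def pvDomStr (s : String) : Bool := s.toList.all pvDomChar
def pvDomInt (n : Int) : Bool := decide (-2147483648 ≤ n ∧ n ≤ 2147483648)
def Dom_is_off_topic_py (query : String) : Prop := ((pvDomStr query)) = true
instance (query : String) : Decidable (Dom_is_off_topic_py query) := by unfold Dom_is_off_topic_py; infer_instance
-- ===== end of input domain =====

-- B replaces A's 13 independent full substring scans (one per keyword) with a single
-- position-major pass that dispatches on the current character and only tests the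
-- keywords starting with that letter as prefixes there (alternative, not measured faster).

-- ===== PORT A =====
-- the 'for keyword in …: if keyword in query_lower: return True' loop is the
-- early-exit fold List.any over the keyword list; 'in' on strings is PySem.Str.isIn
def is_off_topic_py (query : String) : Bool :=
  let query_lower := PySem.Str.lower query
  ["weather", "sports", "politics", "entertainment", "news",
   "personal advice", "medical", "legal", "financial advice",
   "cooking", "travel", "relationships", "general knowledge"].any
    (fun keyword => PySem.Str.isIn keyword query_lower)

-- ===== PORT B =====
-- the loop body of Source B: the if/elif first-letter dispatch at position i with char ch;
-- ql.startswith(kw, i) with 0 ≤ i is PySem.Chars.startswith (q.drop i) kw.toList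
def offTopicAt (q : List Char) (i : Nat) (ch : Char) : Bool :=
  if ch = 'w' then PySem.Chars.startswith (q.drop i) "weather".toList
  else if ch = 's' then PySem.Chars.startswith (q.drop i) "sports".toList
  else if ch = 'p' then PySem.Chars.startswith (q.drop i) "politics".toList
                        || PySem.Chars.startswith (q.drop i) "personal advice".toList
  else if ch = 'e' then PySem.Chars.startswith (q.drop i) "entertainment".toList
  else if ch = 'n' then PySem.Chars.startswith (q.drop i) "news".toList
  else if ch = 'm' then PySem.Chars.startswith (q.drop i) "medical".toList
  else if ch = 'l' then PySem.Chars.startswith (q.drop i) "legal".toList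
  else if ch = 'f' then PySem.Chars.startswith (q.drop i) "financial advice".toList
  else if ch = 'c' then PySem.Chars.startswith (q.drop i) "cooking".toList
  else if ch = 't' then PySem.Chars.startswith (q.drop i) "travel".toList
  else if ch = 'r' then PySem.Chars.startswith (q.drop i) "relationships".toList
  else if ch = 'g' then PySem.Chars.startswith (q.drop i) "general knowledge".toList
  else false

-- 'for i, ch in enumerate(ql)' with early return = any over PySem.List.enumerate
def is_off_topic_py_alt (query : String) : Bool :=
  let q := (PySem.Str.lower query).toList
  (PySem.List.enumerate q).any (fun p => offTopicAt q p.1.toNat p.2)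

-- ===== PRECONDITION & SPEC =====
def Spec_is_off_topic_py (query : String) (out : Bool) : Prop := out = is_off_topic_py_alt query
instance (query : String) (out : Bool) : Decidable (Spec_is_off_topic_py query out) := by unfold Spec_is_off_topic_py; infer_instance

-- ===== CLAIM (what is proved, stated in full; the proofs are below) =====
def Claim_equal_is_off_topic_py : Prop := ∀ (query : String), Dom_is_off_topic_py query → Spec_is_off_topic_py query (is_off_topic_py query)

-- ===== LEMMAS AND PROOFS =====

-- a nonempty prefix of q.drop j pins down q[j]? and j < q.length
theorem pv_prefix_drop_head (q rest : List Char) (c : Char) (j : Nat)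
    (h : (c :: rest) <+: q.drop j) : q[j]? = some c ∧ j < q.length := by
  obtain ⟨t, ht⟩ := h
  have h0 : (q.drop j)[0]? = some c := by rw [← ht]; rfl
  rw [List.getElem?_drop] at h0
  refine ⟨by simpa using h0, ?_⟩
  have h1 := (List.getElem?_eq_some_iff.mp (by simpa using h0 : q[j]? = some c)).1
  exact h1

-- B = true iff the dispatch body fires at some valid position
theorem pv_alt_iff (q : List Char) :
    ((PySem.List.enumerate q).any (fun p => offTopicAt q p.1.toNat p.2) = true) ↔
      ∃ j : Nat, j < q.length ∧ ∃ (h : j < q.length), offTopicAt q j q[j] = true := by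
  simp only [List.any_eq_true, PySem.List.mem_enumerate_iff]
  constructor
  · rintro ⟨p, ⟨k, hk, rfl⟩, hb⟩
    exact ⟨k, hk, hk, by simpa using hb⟩
  · rintro ⟨j, hj, _, hb⟩
    exact ⟨((j : Int), q[j]), ⟨j, hj, by simp⟩, by simpa using hb⟩

-- A's substring test for a nonempty keyword yields a prefix match at a position j < length
-- whose character is the keyword's first letter
theorem pv_fwd (q kw : List Char) (c : Char) (hc : kw.head? = some c)
    (hin : PySem.Chars.isIn kw q = true) :
    ∃ j : Nat, j < q.length ∧ q[j]? = some c ∧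
      PySem.Chars.startswith (q.drop j) kw = true := by
  obtain ⟨j, hp⟩ := (PySem.Chars.exists_prefix_drop_iff_isIn kw q).mpr hin
  cases kw with
  | nil => simp at hc
  | cons a rest =>
    obtain rfl : a = c := by simpa using hc
    obtain ⟨hget, hj⟩ := pv_prefix_drop_head q rest _ j hp
    exact ⟨j, hj, hget, (PySem.Chars.startswith_iff _ _).mpr hp⟩

-- a prefix match of kw at position j is a substring occurrence of kw in q
theorem pv_back (q : List Char) (j : Nat) (kw : String)
    (hb : PySem.Chars.startswith (q.drop j) kw.toList = true) : kw.toList <:+: q := by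
  have hpre : kw.toList <+: q.drop j := (PySem.Chars.startswith_iff _ _).mp hb
  exact hpre.isInfix.trans (List.drop_suffix j q).isInfix

-- ===== VERDICT (by name: the statement is the Claim_ definition above) =====
set_option maxHeartbeats 1600000 in
theorem is_off_topic_py_spec : Claim_equal_is_off_topic_py := by
  intro query _
  unfold Spec_is_off_topic_py is_off_topic_py is_off_topic_py_alt
  set q := (PySem.Str.lower query).toList with hq
  clear_value q
  rw [Bool.eq_iff_iff, pv_alt_iff]
  simp only [List.any_eq_true, List.mem_cons, List.not_mem_nil, or_false,
    PySem.Str.isIn_iff_infix]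
  rw [← hq]
  constructor
  · rintro ⟨kw, hmem, hin⟩
    have hin' : PySem.Chars.isIn kw.toList q = true :=
      (PySem.Chars.isIn_iff_infix _ _).mpr hin
    rcases hmem with rfl|rfl|rfl|rfl|rfl|rfl|rfl|rfl|rfl|rfl|rfl|rfl|rfl
    · obtain ⟨j, hj, hget, hs⟩ := pv_fwd q "weather".toList 'w' (by decide) hin'
      obtain ⟨_, hgj⟩ := List.getElem?_eq_some_iff.mp hget
      simp at hs
      exact ⟨j, hj, hj, by simp [offTopicAt, hgj, hs]⟩
    · obtain ⟨j, hj, hget, hs⟩ := pv_fwd q "sports".toList 's' (by decide) hin'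
      obtain ⟨_, hgj⟩ := List.getElem?_eq_some_iff.mp hget
      simp at hs
      exact ⟨j, hj, hj, by simp [offTopicAt, hgj, hs]⟩
    · obtain ⟨j, hj, hget, hs⟩ := pv_fwd q "politics".toList 'p' (by decide) hin'
      obtain ⟨_, hgj⟩ := List.getElem?_eq_some_iff.mp hget
      simp at hs
      exact ⟨j, hj, hj, by simp [offTopicAt, hgj, hs]⟩
    · obtain ⟨j, hj, hget, hs⟩ := pv_fwd q "entertainment".toList 'e' (by decide) hin'
      obtain ⟨_, hgj⟩ := List.getElem?_eq_some_iff.mp hget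
      simp at hs
      exact ⟨j, hj, hj, by simp [offTopicAt, hgj, hs]⟩
    · obtain ⟨j, hj, hget, hs⟩ := pv_fwd q "news".toList 'n' (by decide) hin'
      obtain ⟨_, hgj⟩ := List.getElem?_eq_some_iff.mp hget
      simp at hs
      exact ⟨j, hj, hj, by simp [offTopicAt, hgj, hs]⟩
    · obtain ⟨j, hj, hget, hs⟩ := pv_fwd q "personal advice".toList 'p' (by decide) hin'
      obtain ⟨_, hgj⟩ := List.getElem?_eq_some_iff.mp hget
      simp at hs
      exact ⟨j, hj, hj, by simp [offTopicAt, hgj, hs]⟩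
    · obtain ⟨j, hj, hget, hs⟩ := pv_fwd q "medical".toList 'm' (by decide) hin'
      obtain ⟨_, hgj⟩ := List.getElem?_eq_some_iff.mp hget
      simp at hs
      exact ⟨j, hj, hj, by simp [offTopicAt, hgj, hs]⟩
    · obtain ⟨j, hj, hget, hs⟩ := pv_fwd q "legal".toList 'l' (by decide) hin'
      obtain ⟨_, hgj⟩ := List.getElem?_eq_some_iff.mp hget
      simp at hs
      exact ⟨j, hj, hj, by simp [offTopicAt, hgj, hs]⟩
    · obtain ⟨j, hj, hget, hs⟩ := pv_fwd q "financial advice".toList 'f' (by decide) hin'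
      obtain ⟨_, hgj⟩ := List.getElem?_eq_some_iff.mp hget
      simp at hs
      exact ⟨j, hj, hj, by simp [offTopicAt, hgj, hs]⟩
    · obtain ⟨j, hj, hget, hs⟩ := pv_fwd q "cooking".toList 'c' (by decide) hin'
      obtain ⟨_, hgj⟩ := List.getElem?_eq_some_iff.mp hget
      simp at hs
      exact ⟨j, hj, hj, by simp [offTopicAt, hgj, hs]⟩
    · obtain ⟨j, hj, hget, hs⟩ := pv_fwd q "travel".toList 't' (by decide) hin'
      obtain ⟨_, hgj⟩ := List.getElem?_eq_some_iff.mp hget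
      simp at hs
      exact ⟨j, hj, hj, by simp [offTopicAt, hgj, hs]⟩
    · obtain ⟨j, hj, hget, hs⟩ := pv_fwd q "relationships".toList 'r' (by decide) hin'
      obtain ⟨_, hgj⟩ := List.getElem?_eq_some_iff.mp hget
      simp at hs
      exact ⟨j, hj, hj, by simp [offTopicAt, hgj, hs]⟩
    · obtain ⟨j, hj, hget, hs⟩ := pv_fwd q "general knowledge".toList 'g' (by decide) hin'
      obtain ⟨_, hgj⟩ := List.getElem?_eq_some_iff.mp hget
      simp at hs
      exact ⟨j, hj, hj, by simp [offTopicAt, hgj, hs]⟩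
  · rintro ⟨j, hj, _, hb⟩
    unfold offTopicAt at hb
    by_cases h1 : q[j] = 'w'
    · rw [if_pos h1] at hb
      exact ⟨"weather", by simp, pv_back q j _ hb⟩
    rw [if_neg h1] at hb
    by_cases h2 : q[j] = 's'
    · rw [if_pos h2] at hb
      exact ⟨"sports", by simp, pv_back q j _ hb⟩
    rw [if_neg h2] at hb
    by_cases h3 : q[j] = 'p'
    · rw [if_pos h3] at hb
      rcases Bool.or_eq_true_iff.mp hb with hb' | hb'
      · exact ⟨"politics", by simp, pv_back q j _ hb'⟩
      · exact ⟨"personal advice", by simp, pv_back q j _ hb'⟩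
    rw [if_neg h3] at hb
    by_cases h4 : q[j] = 'e'
    · rw [if_pos h4] at hb
      exact ⟨"entertainment", by simp, pv_back q j _ hb⟩
    rw [if_neg h4] at hb
    by_cases h5 : q[j] = 'n'
    · rw [if_pos h5] at hb
      exact ⟨"news", by simp, pv_back q j _ hb⟩
    rw [if_neg h5] at hb
    by_cases h6 : q[j] = 'm'
    · rw [if_pos h6] at hb
      exact ⟨"medical", by simp, pv_back q j _ hb⟩
    rw [if_neg h6] at hb
    by_cases h7 : q[j] = 'l'
    · rw [if_pos h7] at hb
      exact ⟨"legal", by simp, pv_back q j _ hb⟩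
    rw [if_neg h7] at hb
    by_cases h8 : q[j] = 'f'
    · rw [if_pos h8] at hb
      exact ⟨"financial advice", by simp, pv_back q j _ hb⟩
    rw [if_neg h8] at hb
    by_cases h9 : q[j] = 'c'
    · rw [if_pos h9] at hb
      exact ⟨"cooking", by simp, pv_back q j _ hb⟩
    rw [if_neg h9] at hb
    by_cases h10 : q[j] = 't'
    · rw [if_pos h10] at hb
      exact ⟨"travel", by simp, pv_back q j _ hb⟩
    rw [if_neg h10] at hb
    by_cases h11 : q[j] = 'r'
    · rw [if_pos h11] at hb
      exact ⟨"relationships", by simp, pv_back q j _ hb⟩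
    rw [if_neg h11] at hb
    by_cases h12 : q[j] = 'g'
    · rw [if_pos h12] at hb
      exact ⟨"general knowledge", by simp, pv_back q j _ hb⟩
    rw [if_neg h12] at hb
    exact absurd hb (by simp)
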